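-- pv_equiv track=rewrite | github.com/Legal-NLP-EkStep/rhetorical-role-baseline | data_prep.py | convert_upper_case_to_title
-- ===== SOURCE A (Python) =====
-- def convert_upper_case_to_title(txt):
--     ########### convert the uppercase words to title case for catching names in NER
--     title_tokens = []
--     for token in txt.split(' '):
--         title_subtokens = []
--         for subtoken in token.split('\n'):
--             if subtoken.isupper():
--                 title_subtokens.append(subtoken.title())
--             else:
--                 title_subtokens.append(subtoken)
--         title_tokens.append('\n'.join(title_subtokens))
--     title_txt = ' '.join(title_tokens)
--     return title_txt
-- ===== SOURCE B (Python) =====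
-- def convert_upper_case_to_title(txt):
--     # single left-to-right pass: rewrite each maximal run of non-space/non-newline
--     # characters in place, keeping every delimiter; no token lists, no re-joins
--     out = []
--     word = []
--     for ch in txt:
--         if ch == ' ' or ch == '\n':
--             w = ''.join(word)
--             out.append(w.title() if w.isupper() else w)
--             out.append(ch)
--             word = []
--         else:
--             word.append(ch)
--     w = ''.join(word)
--     out.append(w.title() if w.isupper() else w)
--     return ''.join(out)
-- ===== Notes on version B (the rewrite author's own statement) =====
-- stated objective: alternative
-- what changed: Replaced the nested split-on-space / split-on-newline token lists and double join with a single left-to-right pass that flushes each maximal non-space/non-newline run through the isupper/title transform, keeping every delimiter in place.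
import Mathlib
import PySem

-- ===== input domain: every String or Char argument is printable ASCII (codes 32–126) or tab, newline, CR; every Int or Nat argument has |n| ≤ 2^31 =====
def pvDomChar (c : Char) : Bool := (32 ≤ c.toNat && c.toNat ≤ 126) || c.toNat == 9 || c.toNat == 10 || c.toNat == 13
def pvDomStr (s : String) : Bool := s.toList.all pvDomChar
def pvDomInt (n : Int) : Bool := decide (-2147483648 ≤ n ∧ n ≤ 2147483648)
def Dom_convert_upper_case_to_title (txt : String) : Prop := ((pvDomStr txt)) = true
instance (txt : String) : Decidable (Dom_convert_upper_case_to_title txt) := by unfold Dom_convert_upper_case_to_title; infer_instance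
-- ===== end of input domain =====

-- B replaces the split-on-space / split-on-newline / double-join pipeline by one
-- left-to-right pass that rewrites each maximal non-space/non-newline run in place (alternative decomposition).


-- shared helpers for Python's str.isupper() / str.title(), which PySem does not provide;
-- hand-ported, exact on the ASCII domain (cased characters = A-Z / a-z, via PySem's char classifiers)
def pyStrIsupper (cs : List Char) : Bool :=
  cs.any PySem.Chars.isupper && !(cs.any PySem.Chars.islower)

-- str.title(): a cased character is uppercased after a non-cased character, lowercased after a cased one
def pyTitleAux : List Char → Bool → List Char
  | [], _ => []
  | c :: rest, prevCased =>
    let cased := PySem.Chars.isupper c || PySem.Chars.islower c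
    (if cased then (if prevCased then PySem.Chars.lowerChar c else PySem.Chars.upperChar c) else c)
      :: pyTitleAux rest cased

def pyStrTitle (cs : List Char) : List Char := pyTitleAux cs false

-- 'subtoken.title() if subtoken.isupper() else subtoken'
def pvTransform (w : List Char) : List Char :=
  if pyStrIsupper w then pyStrTitle w else w

-- ===== PORT A =====
-- literal port of A on the code-point list: split(' '), inner split('\n'), transform, '\n'.join, ' '.join
def convert_upper_case_to_title (txt : String) : String :=
  let title_tokens := (PySem.Chars.splitOn txt.toList [' ']).map (fun token =>
    let title_subtokens := (PySem.Chars.splitOn token ['\n']).map (fun subtoken =>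
      pvTransform subtoken)
    PySem.Chars.join ['\n'] title_subtokens)
  String.ofList (PySem.Chars.join [' '] title_tokens)

-- ===== PORT B =====
-- literal port of Source B's single pass: `word` is the pending run, flushed through pvTransform at each delimiter and at the end
def pvScanB : List Char → List Char → List Char
  | word, [] => pvTransform word
  | word, c :: rest =>
    if c = ' ' ∨ c = '\n' then pvTransform word ++ c :: pvScanB [] rest
    else pvScanB (word ++ [c]) rest

def convert_upper_case_to_title_alt (txt : String) : String :=
  String.ofList (pvScanB [] txt.toList)

-- ===== PRECONDITION & SPEC =====
def Spec_convert_upper_case_to_title (txt : String) (out : String) : Prop := out = convert_upper_case_to_title_alt txt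
instance (txt : String) (out : String) : Decidable (Spec_convert_upper_case_to_title txt out) := by unfold Spec_convert_upper_case_to_title; infer_instance

-- ===== CLAIM (what is proved, stated in full; the proofs are below) =====
def Claim_equal_convert_upper_case_to_title : Prop := ∀ (txt : String), Dom_convert_upper_case_to_title txt → Spec_convert_upper_case_to_title txt (convert_upper_case_to_title txt)

-- ===== LEMMAS AND PROOFS =====

-- simple single-character splitter used only by the proof
def pvSplitChar (d : Char) : List Char → List (List Char)
  | [] => [[]]
  | c :: cs => if c = d then [] :: pvSplitChar d cs else (pvSplitChar d cs).modifyHead (c :: ·)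

theorem pvSplitOn_go_single (d : Char) :
    ∀ (fuel : Nat) (l : List Char), l.length < fuel → ∀ (cur : List Char) (acc : List (List Char)),
      PySem.Chars.splitOn.go [d] fuel l cur acc
        = acc.reverse ++ (pvSplitChar d l).modifyHead (cur.reverse ++ ·) := by
  intro fuel
  induction fuel with
  | zero => intro l hl; omega
  | succ fuel ih =>
    intro l hl cur acc
    cases l with
    | nil => simp [PySem.Chars.splitOn.go, pvSplitChar]
    | cons c rest =>
      by_cases hc : c = d
      · subst hc
        rw [show PySem.Chars.splitOn.go [c] (fuel+1) (c :: rest) cur acc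
              = PySem.Chars.splitOn.go [c] fuel rest [] (cur.reverse :: acc) by
            simp [PySem.Chars.splitOn.go, List.isPrefixOf]]
        rw [ih rest (by simpa using Nat.lt_of_succ_lt_succ hl)]
        simp [pvSplitChar]
        cases pvSplitChar c rest <;> simp
      · rw [show PySem.Chars.splitOn.go [d] (fuel+1) (c :: rest) cur acc
              = PySem.Chars.splitOn.go [d] fuel rest (c :: cur) acc by
            simp [PySem.Chars.splitOn.go, List.isPrefixOf, Ne.symm hc]]
        rw [ih rest (by simpa using Nat.lt_of_succ_lt_succ hl)]
        cases h : pvSplitChar d rest with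
        | nil => simp [pvSplitChar, hc, h]
        | cons a t => simp [pvSplitChar, hc, h]

theorem pvSplitOn_single (d : Char) (l : List Char) :
    PySem.Chars.splitOn l [d] = pvSplitChar d l := by
  rw [PySem.Chars.splitOn, pvSplitOn_go_single d (l.length + 1) l (by omega) [] []]
  cases h : pvSplitChar d l <;> simp

theorem pvSplitChar_ne_nil (d : Char) (l : List Char) : pvSplitChar d l ≠ [] := by
  induction l with
  | nil => simp [pvSplitChar]
  | cons c cs ih =>
    simp only [pvSplitChar]
    split_ifs
    · simp
    · cases h : pvSplitChar d cs with
      | nil => exact absurd h ih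
      | cons a t => simp

theorem pvSplitChar_not_mem (d : Char) (l : List Char) (h : d ∉ l) :
    pvSplitChar d l = [l] := by
  induction l with
  | nil => rfl
  | cons c cs ih =>
    have hc : c ≠ d := fun hcd => h (by simp [hcd])
    rw [pvSplitChar, if_neg hc, ih (fun hm => h (by simp [hm]))]
    rfl

theorem pvSplitChar_append_self (d : Char) (xs ys : List Char) (h : d ∉ xs) :
    pvSplitChar d (xs ++ d :: ys) = xs :: pvSplitChar d ys := by
  induction xs with
  | nil => simp [pvSplitChar]
  | cons c cs ih =>
    have hc : c ≠ d := fun hcd => h (by simp [hcd])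
    rw [List.cons_append, pvSplitChar, if_neg hc,
      ih (fun hm => h (by simp [hm]))]
    rfl

theorem pvSplitChar_cons_ne (d c : Char) (ys : List Char) (hc : c ≠ d) :
    pvSplitChar d (c :: ys) = (pvSplitChar d ys).modifyHead (c :: ·) := by
  rw [pvSplitChar, if_neg hc]

theorem pvSplitChar_append_modifyHead (d : Char) (xs ys : List Char) (h : d ∉ xs) :
    pvSplitChar d (xs ++ ys) = (pvSplitChar d ys).modifyHead (xs ++ ·) := by
  induction xs with
  | nil =>
    cases hh : pvSplitChar d ys with
    | nil => exact absurd hh (pvSplitChar_ne_nil d ys)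
    | cons a t => simp [hh]
  | cons c cs ih =>
    have hc : c ≠ d := fun hcd => h (by simp [hcd])
    rw [List.cons_append, pvSplitChar_cons_ne d c _ hc, ih (fun hm => h (by simp [hm]))]
    cases hh : pvSplitChar d ys with
    | nil => exact absurd hh (pvSplitChar_ne_nil d ys)
    | cons a t => simp

-- join of a cons whose head carries a prefix
theorem pvJoin_cons_append (sep a x : List Char) (l : List (List Char)) :
    PySem.Chars.join sep ((a ++ x) :: l) = a ++ PySem.Chars.join sep (x :: l) := by
  cases l with
  | nil => simp [PySem.Chars.join_singleton]
  | cons b t => simp [PySem.Chars.join_cons_cons]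

-- A's whole pipeline, on lists, via the proof-side splitter
def pvA (l : List Char) : List Char :=
  PySem.Chars.join [' '] ((pvSplitChar ' ' l).map (fun token =>
    PySem.Chars.join ['\n'] ((pvSplitChar '\n' token).map pvTransform)))

def pvNoDelim (w : List Char) : Prop := (' ' ∉ w) ∧ ('\n' ∉ w)

-- the inner '\n' pipeline on a delimiter-free word is just the transform
theorem pvA_inner_word (w : List Char) (h : '\n' ∉ w) :
    PySem.Chars.join ['\n'] ((pvSplitChar '\n' w).map pvTransform) = pvTransform w := by
  rw [pvSplitChar_not_mem _ _ h]
  simp [PySem.Chars.join_singleton]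

theorem pvA_word (w : List Char) (h : pvNoDelim w) : pvA w = pvTransform w := by
  unfold pvA
  rw [pvSplitChar_not_mem _ _ h.1]
  simp [PySem.Chars.join_singleton, pvA_inner_word w h.2]

theorem pvA_space (w cs : List Char) (h : pvNoDelim w) :
    pvA (w ++ ' ' :: cs) = pvTransform w ++ ' ' :: pvA cs := by
  unfold pvA
  rw [pvSplitChar_append_self _ _ _ h.1]
  cases hh : pvSplitChar ' ' cs with
  | nil => exact absurd hh (pvSplitChar_ne_nil _ _)
  | cons a t =>
    simp only [List.map_cons, PySem.Chars.join_cons_cons, pvA_inner_word w h.2]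
    simp

theorem pvA_newline (w cs : List Char) (h : pvNoDelim w) :
    pvA (w ++ '\n' :: cs) = pvTransform w ++ '\n' :: pvA cs := by
  unfold pvA
  have hx : ' ' ∉ w ++ ['\n'] := by
    intro hm
    rcases List.mem_append.mp hm with hm | hm
    · exact h.1 hm
    · simp at hm
  rw [show w ++ '\n' :: cs = (w ++ ['\n']) ++ cs by simp,
    pvSplitChar_append_modifyHead _ _ _ hx]
  cases hh : pvSplitChar ' ' cs with
  | nil => exact absurd hh (pvSplitChar_ne_nil _ _)
  | cons a t =>
    simp only [List.modifyHead, List.map_cons]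
    rw [show (w ++ ['\n']) ++ a = w ++ '\n' :: a by simp,
      pvSplitChar_append_self _ _ _ h.2]
    cases hin : pvSplitChar '\n' a with
    | nil => exact absurd hin (pvSplitChar_ne_nil _ _)
    | cons b u =>
      simp only [List.map_cons, PySem.Chars.join_cons_cons]
      rw [pvJoin_cons_append [' '] (pvTransform w ++ ['\n'])]
      simp

-- B's scanner computes A's pipeline with the pending word prepended
theorem pvScanB_eq_pvA (cs : List Char) : ∀ (w : List Char), pvNoDelim w →
    pvScanB w cs = pvA (w ++ cs) := by
  induction cs with
  | nil =>
    intro w hw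
    rw [pvScanB, List.append_nil, pvA_word w hw]
  | cons c rest ih =>
    intro w hw
    by_cases hc : c = ' ' ∨ c = '\n'
    · rw [pvScanB, if_pos hc, ih [] ⟨by simp, by simp⟩]
      rcases hc with hc | hc <;> subst hc
      · rw [pvA_space w rest hw]; simp
      · rw [pvA_newline w rest hw]; simp
    · have hc1 : c ≠ ' ' := fun hh => hc (Or.inl hh)
      have hc2 : c ≠ '\n' := fun hh => hc (Or.inr hh)
      have hnd : pvNoDelim (w ++ [c]) := by
        refine ⟨fun hm => ?_, fun hm => ?_⟩
        · rcases List.mem_append.mp hm with hm | hm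
          · exact hw.1 hm
          · simp at hm; exact hc1 hm.symm
        · rcases List.mem_append.mp hm with hm | hm
          · exact hw.2 hm
          · simp at hm; exact hc2 hm.symm
      rw [pvScanB, if_neg hc, ih (w ++ [c]) hnd]
      simp

-- ===== VERDICT (by name: the statement is the Claim_ definition above) =====
theorem convert_upper_case_to_title_spec : Claim_equal_convert_upper_case_to_title := by
  intro txt _
  unfold Spec_convert_upper_case_to_title convert_upper_case_to_title convert_upper_case_to_title_alt
  rw [pvScanB_eq_pvA txt.toList [] ⟨by simp, by simp⟩]
  unfold pvA
  simp only [pvSplitOn_single, List.nil_append]
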